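-- pv_equiv track=rewrite | github.com/NTNU-code-duplication-detection/dataset_loader | preprocessing/comment_stripper.py | _consume_literal
-- ===== SOURCE A (Python) =====
-- def _consume_literal(source: str, i: int, quote: str) -> tuple[list[str], int]:
--     """Consume a string or character literal, returning chars and new index."""
--     length = len(source)
--     chars: list[str] = [quote]
--     i += 1
--     while i < length and source[i] != quote:
--         if source[i] == '\\':
--             chars.append(source[i])
--             i += 1
--         if i < length:
--             chars.append(source[i])
--             i += 1
--     if i < length:
--         chars.append(source[i])
--         i += 1
--     return chars, i
-- ===== SOURCE B (Python) =====
-- def _find_end(source, j, quote, n):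
--     """Index just past the literal that starts before position j."""
--     while j < n:
--         c = source[j]
--         if c == quote:
--             return j + 1
--         j = min(j + 2, n) if c == '\\' else j + 1
--     return j
--
--
-- def _consume_literal(source, i, quote):
--     """Consume a string or character literal, returning chars and new index."""
--     n = len(source)
--     j = _find_end(source, i + 1, quote, n)
--     return [quote] + [source[k] for k in range(i + 1, j)], j
-- ===== Notes on version B (the rewrite author's own statement) =====
-- stated objective: alternative
-- what changed: Instead of one loop that interleaves index bookkeeping with appending each scanned character, B first computes only the end index of the literal with a small scanner (stepping 2 over escapes) and then materialises the result in one shot as [quote] plus the indexed span source[i+1:end].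
import Mathlib
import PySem

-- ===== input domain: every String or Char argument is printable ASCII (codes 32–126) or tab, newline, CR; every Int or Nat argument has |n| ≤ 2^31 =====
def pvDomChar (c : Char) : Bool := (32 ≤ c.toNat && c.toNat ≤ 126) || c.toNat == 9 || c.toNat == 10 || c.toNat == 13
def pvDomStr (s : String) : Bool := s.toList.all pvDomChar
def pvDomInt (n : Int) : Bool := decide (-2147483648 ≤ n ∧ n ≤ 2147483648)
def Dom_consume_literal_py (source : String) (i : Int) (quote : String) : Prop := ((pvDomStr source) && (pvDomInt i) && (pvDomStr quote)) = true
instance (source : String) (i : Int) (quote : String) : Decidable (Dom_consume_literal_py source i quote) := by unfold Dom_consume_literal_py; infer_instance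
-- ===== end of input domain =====

-- B computes the end index of the literal first, then materialises [quote] + the indexed span;
-- A builds the char list while scanning. Return values proved equal wherever A does not raise.

-- ===== PORT A =====
-- A's while-loop, flattened: each iteration either exits on the closing quote (the trailing
-- 'if i < length' then fires), consumes an escape pair, or consumes one character.
def consumeLoopA (s : List Char) (q : String) (n : Int) (chars : List String) (i : Int) :
    List String × Int :=
  if _h : i < n then
    match PySem.List.pyGet? s i with
    | none => (chars, i)  -- source[i] raises IndexError in Python; unreachable under Pre_
    | some c =>
      if String.singleton c = q then
        -- loop condition fails; final 'if i < length' appends the closing quote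
        (chars ++ [String.singleton c], i + 1)
      else if c = '\\' then
        if _h2 : i + 1 < n then
          match PySem.List.pyGet? s (i + 1) with
          | none => (chars ++ [String.singleton c], i + 1)  -- unreachable (IndexError region)
          | some c2 => consumeLoopA s q n (chars ++ [String.singleton c, String.singleton c2]) (i + 2)
        else (chars ++ [String.singleton c], i + 1)
      else consumeLoopA s q n (chars ++ [String.singleton c]) (i + 1)
  else (chars, i)
termination_by (n - i).toNat
decreasing_by all_goals (simp; omega)

def consume_literal_py (source : String) (i : Int) (quote : String) : List String × Int :=
  let s := source.toList
  consumeLoopA s quote (s.length : Int) [quote] (i + 1)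

-- ===== PORT B =====
-- Source B's _find_end: scan for the index just past the literal, stepping min(j+2, n) over escapes.
def findEnd (s : List Char) (j : Int) (quote : String) (n : Int) : Int :=
  if _h : j < n then
    match PySem.List.pyGet? s j with
    | none => j  -- source[j] raises IndexError in Python; unreachable under Pre_
    | some c =>
      if String.singleton c = quote then j + 1
      else findEnd s (if c = '\\' then min (j + 2) n else j + 1) quote n
  else j
termination_by (n - j).toNat
decreasing_by simp; omega

-- body of Source B's comprehension: source[k] as a one-character string
def idxStr (s : List Char) (k : Int) : String :=
  ((PySem.List.pyGet? s k).map String.singleton).getD ""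

def consume_literal_py_alt (source : String) (i : Int) (quote : String) : List String × Int :=
  let s := source.toList
  let n : Int := s.length
  let j := findEnd s (i + 1) quote n
  (quote :: (PySem.List.pyRange (i + 1) j 1).map (idxStr s), j)

-- ===== PRECONDITION & SPEC =====
-- Pre_ excludes exactly the inputs where A raises IndexError: a start index i+1 below
-- -len(source) makes the first source[i] access raise (B raises there too).
def Pre_consume_literal_py (source : String) (i : Int) (quote : String) : Prop :=
  -(source.toList.length : Int) ≤ i + 1
instance (source : String) (i : Int) (quote : String) : Decidable (Pre_consume_literal_py source i quote) := by unfold Pre_consume_literal_py; infer_instance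

def pvWitness_consume_literal_py : String × Int × String := ("ab's", 1, "'")

def Spec_consume_literal_py (source : String) (i : Int) (quote : String) (out : List String × Int) : Prop := out = consume_literal_py_alt source i quote
instance (source : String) (i : Int) (quote : String) (out : List String × Int) : Decidable (Spec_consume_literal_py source i quote out) := by unfold Spec_consume_literal_py; infer_instance

-- ===== CLAIM (what is proved, stated in full; the proofs are below) =====
def Claim_equal_consume_literal_py : Prop := ∀ (source : String) (i : Int) (quote : String), Dom_consume_literal_py source i quote → Pre_consume_literal_py source i quote → Spec_consume_literal_py source i quote (consume_literal_py source i quote)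

-- ===== LEMMAS AND PROOFS =====

theorem findEnd_ge (s : List Char) (j : Int) (q : String) (n : Int) :
    j ≤ findEnd s j q n := by
  induction j using findEnd.induct (s := s) (quote := q) (n := n) with
  | case1 j h hc => rw [findEnd]; simp [h, hc]
  | case2 j h c hc hq => rw [findEnd]; simp only [dif_pos h, hc, if_pos hq]; omega
  | case3 j h c hc hq ih =>
      rw [findEnd]; simp only [dif_pos h, hc, if_neg hq]
      split_ifs at ih ⊢ <;> omega
  | case4 j h => rw [findEnd]; simp [h]

-- Loop invariant: A's loop result is the accumulator plus the indexed span up to findEnd.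
theorem loopA_eq (s : List Char) (q : String) (n : Int) (chars : List String) (j : Int)
    (hn : n = (s.length : Int)) :
      consumeLoopA s q n chars j =
        (chars ++ (PySem.List.pyRange j (findEnd s j q n) 1).map (idxStr s),
         findEnd s j q n) := by
  revert hn
  induction chars, j using consumeLoopA.induct (s := s) (q := q) (n := n) with
  | case1 chars i h hc =>
      intro hn
      rw [consumeLoopA, findEnd]
      simp [h, hc, PySem.List.pyRange_one_eq_nil (le_refl i)]
  | case2 chars i h c hc hq =>
      intro hn
      rw [consumeLoopA, findEnd]
      simp [h, hc, hq, PySem.List.pyRange_one_singleton, idxStr]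
  | case3 chars i h h2 hc2 hc hq =>
      -- backslash, next index in the loop range but source[i+1] out of range: impossible
      intro hn
      exfalso
      have h1 : PySem.List.pyGet? s i ≠ none := by simp [hc]
      rw [Ne, PySem.List.pyGet?_eq_none_iff] at h1
      rw [PySem.List.pyGet?_eq_none_iff] at hc2
      simp [PySem.Raise.InRange] at h1 hc2
      omega
  | case4 chars i h h2 c2 hc2 hc hq ih =>
      -- backslash, escaped character exists
      intro hn
      have hmin : min (i + 2) n = i + 2 := by omega
      rw [consumeLoopA, findEnd]
      simp only [dif_pos h, hc, if_neg hq, dif_pos h2, hc2, if_true, hmin]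
      rw [ih hn]
      have hge := findEnd_ge s (i + 2) q n
      rw [PySem.List.pyRange_one_cons (by omega : i < findEnd s (i + 2) q n),
          PySem.List.pyRange_one_cons (by omega : i + 1 < findEnd s (i + 2) q n)]
      simp [idxStr, hc, hc2]
      rw [show i + 1 + 1 = i + 2 from by ring]
  | case5 chars i h h2 hc hq =>
      -- backslash at the last position: the loop overshoots, the scanner clamps to n = i + 1
      intro hn
      have hmin : min (i + 2) n = n := by omega
      have hn1 : n = i + 1 := by omega
      rw [consumeLoopA, findEnd]
      simp only [dif_pos h, hc, if_neg hq, dif_neg h2, if_true, hmin]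
      rw [findEnd]
      simp [hn1, PySem.List.pyRange_one_singleton, idxStr, hc]
  | case6 chars i h c hc hq hb ih =>
      -- ordinary character
      intro hn
      rw [consumeLoopA, findEnd]
      simp only [dif_pos h, hc, if_neg hq, if_neg hb]
      rw [ih hn]
      have hge := findEnd_ge s (i + 1) q n
      rw [PySem.List.pyRange_one_cons (by omega : i < findEnd s (i + 1) q n)]
      simp [idxStr, hc]
  | case7 chars i h =>
      intro hn
      rw [consumeLoopA, findEnd]
      simp [h, PySem.List.pyRange_one_eq_nil (le_refl i)]

-- ===== VERDICT (by name: the statement is the Claim_ definition above) =====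
theorem consume_literal_py_spec : Claim_equal_consume_literal_py := by
  intro source i quote _dom _pre
  unfold Spec_consume_literal_py consume_literal_py consume_literal_py_alt
  simp only []
  rw [loopA_eq source.toList quote _ _ _ rfl]
  simp
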